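-- pv_equiv track=rewrite | github.com/julama/GA_EI | cega.py | phenotyp
-- ===== SOURCE A (Python) =====
-- def fill_phenos(genome, dict_pheno, group, u):
--     '''
--     helper function for the function phenotyp. Fills in group cluster recursively
--     :param genome: dict, the genome
--     :param dict_pheno: dict, the phenotype mapping of the genome
--     :param group: current group
--     :param u: int, iterator
--     :return:
--     '''
--     dict_pheno[u] = group
--     if genome[u] in dict_pheno:
--         return
--     else:
--         fill_phenos(genome, dict_pheno, group, genome[u])
--
-- def phenotyp(TPM, genome):
--     '''
--     this function creates a TPM of the macro network defined by the genome
--     :param TPM: tranistion matrix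
--     :param genome: dict, genome of an individual
--     :return: dict, the phenotype mapping from the genome
--     '''
--     dict_pheno = dict()
--     group = 0
--     for i in range(len(genome)):
--         if i not in dict_pheno and genome[i] not in dict_pheno:
--             fill_phenos(genome, dict_pheno, group, i)
--             group += 1
--         else:
--             dict_pheno[i] = dict_pheno[genome[i]]
--
--     #values for the function create_macro start from 1 not 0
--     for k, v in dict_pheno.items():
--         dict_pheno[k] = v + 1
--     return dict_pheno
-- ===== SOURCE B (Python) =====
-- def phenotyp(TPM, genome):
--     '''
--     Iterative re-implementation: each unlabeled chain is first collected as an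
--     explicit path list (with a companion set for the cycle check), then
--     batch-labeled; groups are numbered from 1 directly, so the final
--     increment pass of the original disappears.
--     '''
--     pheno = {}
--     group = 1
--     for i in range(len(genome)):
--         if i in pheno or genome[i] in pheno:
--             pheno[i] = pheno[genome[i]]
--         else:
--             path = [i]
--             on_path = {i}
--             while genome[path[-1]] not in pheno and genome[path[-1]] not in on_path:
--                 u = genome[path[-1]]
--                 path.append(u)
--                 on_path.add(u)
--             for u in path:
--                 pheno[u] = group
--             group += 1
--     return pheno
-- ===== Notes on version B (the rewrite author's own statement) =====
-- stated objective: alternative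
-- what changed: The recursive helper fill_phenos is replaced by an iterative collect-the-chain-then-batch-label pass (an explicit path list with a companion set for the cycle check), and groups are numbered from 1 directly so A's final increment-every-value pass disappears.
import Mathlib
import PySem

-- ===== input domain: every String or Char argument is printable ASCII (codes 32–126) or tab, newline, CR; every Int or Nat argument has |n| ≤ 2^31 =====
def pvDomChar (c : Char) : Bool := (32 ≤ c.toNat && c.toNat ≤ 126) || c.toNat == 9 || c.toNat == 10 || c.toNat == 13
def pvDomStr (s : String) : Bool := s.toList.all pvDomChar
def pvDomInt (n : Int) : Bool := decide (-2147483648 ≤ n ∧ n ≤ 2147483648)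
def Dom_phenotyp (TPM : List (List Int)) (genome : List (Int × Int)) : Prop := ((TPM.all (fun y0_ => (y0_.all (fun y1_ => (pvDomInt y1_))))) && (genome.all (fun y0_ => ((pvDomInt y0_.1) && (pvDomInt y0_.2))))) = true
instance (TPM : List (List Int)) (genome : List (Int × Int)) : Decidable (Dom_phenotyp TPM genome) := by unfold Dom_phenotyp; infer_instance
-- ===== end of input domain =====

-- B replaces A's recursive helper by collect-the-chain-then-batch-label iteration and
-- numbers groups from 1 directly, dropping A's final increment pass (objective: alternative).

-- ===== PORT A =====
-- fill_phenos; the recursion is run on fuel n+1 (n = number of genome keys), ample for the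
-- depth Python reaches on the admitted inputs; `none` branches = Python KeyError (outside Pre_)
def fillPhenos (g : PySem.Dict Int Int) (group : Int) : Nat → PySem.Dict Int Int → Int → PySem.Dict Int Int
  | 0, dp, _ => dp
  | fuel+1, dp, u =>
    let dp' := dp.insert u group
    match g.get? u with
    | none => dp'                      -- genome[u] : KeyError
    | some v => if dp'.contains v then dp' else fillPhenos g group fuel dp' v

-- loop body of A's `for i in range(len(genome))` (st = (dict_pheno, group))
def stepA (g : PySem.Dict Int Int) (n : Nat) (st : PySem.Dict Int Int × Int) (i : Nat) :
    PySem.Dict Int Int × Int :=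
  match g.get? (i : Int) with
  | none => st                         -- genome[i] : KeyError
  | some v =>
    if !(st.1.contains (i : Int)) && !(st.1.contains v) then
      (fillPhenos g st.2 (n+1) st.1 (i : Int), st.2 + 1)
    else
      match st.1.get? v with
      | none => st                     -- dict_pheno[genome[i]] : KeyError
      | some w => (st.1.insert (i : Int) w, st.2)

def phenotyp (TPM : List (List Int)) (genome : List (Int × Int)) : List (Int × Int) :=
  let g := PySem.Dict.ofList genome
  let n := g.size
  let st := (List.range n).foldl (stepA g n) (PySem.Dict.empty, 0)
  -- for k, v in dict_pheno.items(): dict_pheno[k] = v + 1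
  (st.1.items.foldl (fun (d : PySem.Dict Int Int) kv => d.insert kv.1 (kv.2 + 1)) st.1).items

-- ===== PORT B =====
-- the while-loop that collects the chain; `path` is kept in reverse (append = cons) and
-- reversed once on exit; `onPath` is Source B's companion set; fuel n suffices on the admitted
-- inputs (the path holds distinct genome keys); `none` branch = Python KeyError (outside Pre_)
def phenoPath (g ph : PySem.Dict Int Int) : Nat → List Int → PySem.Set Int → List Int
  | 0, path, _ => path.reverse
  | fuel+1, path, onPath =>
    match path with
    | [] => []                         -- unreachable: path starts nonempty
    | last :: _ =>
      match g.get? last with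
      | none => path.reverse           -- genome[path[-1]] : KeyError
      | some v =>
        if !(ph.contains v) && !(onPath.contains v) then
          phenoPath g ph fuel (v :: path) (PySem.Set.add onPath v)
        else path.reverse

-- loop body of B's `for i in range(len(genome))` (st = (pheno, group))
def stepB (g : PySem.Dict Int Int) (n : Nat) (st : PySem.Dict Int Int × Int) (i : Nat) :
    PySem.Dict Int Int × Int :=
  match g.get? (i : Int) with
  | none => st
  | some v =>
    if st.1.contains (i : Int) || st.1.contains v then
      match st.1.get? v with
      | none => st
      | some w => (st.1.insert (i : Int) w, st.2)
    else
      ((phenoPath g st.1 n [(i : Int)] (PySem.Set.ofList [(i : Int)])).foldl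
          (fun d u => d.insert u st.2) st.1,
       st.2 + 1)

def phenotyp_alt (TPM : List (List Int)) (genome : List (Int × Int)) : List (Int × Int) :=
  let g := PySem.Dict.ofList genome
  let n := g.size
  let st := (List.range n).foldl (stepB g n) (PySem.Dict.empty, 1)
  st.1.items

-- ===== PRECONDITION & SPEC =====
-- Pre_: every index 0..len(genome)-1 is a genome key and its value is again a genome key;
-- exactly the inputs on which Python A returns (elsewhere A raises KeyError).
def Pre_phenotyp (TPM : List (List Int)) (genome : List (Int × Int)) : Prop :=
  ∀ i ∈ List.range (PySem.Dict.ofList genome).size,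
    ((PySem.Dict.ofList genome).get? (i : Int)).any
      (fun v => (PySem.Dict.ofList genome).contains v) = true
instance (TPM : List (List Int)) (genome : List (Int × Int)) : Decidable (Pre_phenotyp TPM genome) := by unfold Pre_phenotyp; infer_instance

def pvWitness_phenotyp : List (List Int) × (List (Int × Int)) := ([], [(0, 0), (1, 0)])

def Spec_phenotyp (TPM : List (List Int)) (genome : List (Int × Int)) (out : List (Int × Int)) : Prop := out = phenotyp_alt TPM genome
instance (TPM : List (List Int)) (genome : List (Int × Int)) (out : List (Int × Int)) : Decidable (Spec_phenotyp TPM genome out) := by unfold Spec_phenotyp; infer_instance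

-- ===== CLAIM (what is proved, stated in full; the proofs are below) =====
def Claim_equal_phenotyp : Prop := ∀ (TPM : List (List Int)) (genome : List (Int × Int)), Dom_phenotyp TPM genome → Pre_phenotyp TPM genome → Spec_phenotyp TPM genome (phenotyp TPM genome)

-- ===== LEMMAS AND PROOFS =====

-- the batch labelling `for u in path: pheno[u] = group`
def insFold (grp : Int) (d : PySem.Dict Int Int) (L : List Int) : PySem.Dict Int Int :=
  L.foldl (fun d x => d.insert x grp) d

-- every value bumped by one (what A's final pass does to dict_pheno)
def mv (d : PySem.Dict Int Int) : PySem.Dict Int Int :=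
  PySem.Dict.mk (d.items.map (fun kv => (kv.1, kv.2 + 1)))

lemma insFold_append (grp : Int) (d : PySem.Dict Int Int) (L : List Int) (u : Int) :
    insFold grp d (L ++ [u]) = (insFold grp d L).insert u grp := by
  simp [insFold]

lemma mem_insFold (grp : Int) (L : List Int) (d : PySem.Dict Int Int) (x : Int) :
    (insFold grp d L).contains x = true ↔ d.contains x = true ∨ x ∈ L := by
  induction L generalizing d with
  | nil => simp [insFold]
  | cons y L ih =>
    simp only [insFold, List.foldl_cons] at *
    rw [ih]
    simp [PySem.Dict.contains_insert, beq_iff_eq]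
    tauto

lemma nodup_insFold (grp : Int) (L : List Int) (d : PySem.Dict Int Int)
    (h : d.keys.Nodup) : (insFold grp d L).keys.Nodup :=
  PySem.Dict.nodup_keys_foldl_insert L (fun _ _ => grp) d h

lemma mv_get? (d : PySem.Dict Int Int) (x : Int) :
    (mv d).get? x = (d.get? x).map (· + 1) := by
  obtain ⟨l⟩ := d
  induction l with
  | nil => simp [mv, PySem.Dict.get?]
  | cons kv l ih =>
    obtain ⟨k, v⟩ := kv
    simp only [mv, PySem.Dict.items] at *
    simp only [List.map_cons, PySem.Dict.get?_mk_cons]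
    split_ifs <;> simp_all

lemma mv_contains (d : PySem.Dict Int Int) (x : Int) :
    (mv d).contains x = d.contains x := by
  rw [PySem.Dict.contains_eq_isSome_get?, PySem.Dict.contains_eq_isSome_get?, mv_get?]
  cases d.get? x <;> rfl

lemma mv_insert (d : PySem.Dict Int Int) (k w : Int) :
    mv (d.insert k w) = (mv d).insert k (w + 1) := by
  apply PySem.Dict.ext
  by_cases hc : d.contains k = true
  · have hc' : (mv d).contains k = true := by rw [mv_contains]; exact hc
    rw [show (mv (d.insert k w)).items
        = (d.insert k w).items.map (fun kv => (kv.1, kv.2 + 1)) from rfl,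
      PySem.Dict.items_insert_of_contains _ _ hc,
      PySem.Dict.items_insert_of_contains _ _ hc',
      show (mv d).items = d.items.map (fun kv => (kv.1, kv.2 + 1)) from rfl,
      List.map_map, List.map_map]
    apply List.map_congr_left
    intro p _
    by_cases hp : p.1 = k <;> simp [hp]
  · have hcf : d.contains k = false := by simpa using hc
    have hcf' : (mv d).contains k = false := by rw [mv_contains]; exact hcf
    rw [show (mv (d.insert k w)).items
        = (d.insert k w).items.map (fun kv => (kv.1, kv.2 + 1)) from rfl,
      PySem.Dict.items_insert_of_not_contains _ _ hcf,
      PySem.Dict.items_insert_of_not_contains _ _ hcf',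
      show (mv d).items = d.items.map (fun kv => (kv.1, kv.2 + 1)) from rfl]
    simp

lemma mv_insFold (grp : Int) (L : List Int) (d : PySem.Dict Int Int) :
    mv (insFold grp d L) = insFold (grp + 1) (mv d) L := by
  induction L generalizing d with
  | nil => rfl
  | cons y L ih => simp only [insFold, List.foldl_cons] at *; rw [← mv_insert, ih]

lemma phenoPath_mv (g d : PySem.Dict Int Int) :
    ∀ (fuel : Nat) (path : List Int) (s : PySem.Set Int),
      phenoPath g (mv d) fuel path s = phenoPath g d fuel path s := by
  intro fuel
  induction fuel with
  | zero => intro path s; rfl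
  | succ fuel ih =>
    intro path s
    cases path with
    | nil => rfl
    | cons last rest =>
      simp only [phenoPath]
      cases g.get? last with
      | none => rfl
      | some v =>
        simp only [mv_contains]
        split_ifs with h
        · exact ih _ _
        · rfl

-- the walk/collect correspondence: running fill_phenos from u on top of `insFold ph acc.reverse`
-- equals batch-labelling the collected path on top of ph
lemma walk_eq (g : PySem.Dict Int Int) (grp : Int) :
    ∀ (fuel : Nat) (ph : PySem.Dict Int Int) (acc : List Int) (u : Int) (s : PySem.Set Int),
      (∀ x, x ∈ s ↔ x ∈ (u :: acc)) →
      fillPhenos g grp (fuel + 1) (insFold grp ph acc.reverse) u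
        = insFold grp ph (phenoPath g ph fuel (u :: acc) s) := by
  intro fuel
  induction fuel with
  | zero =>
    intro ph acc u s _
    have hins : (insFold grp ph acc.reverse).insert u grp = insFold grp ph (u :: acc).reverse := by
      rw [List.reverse_cons, insFold_append]
    cases hg : g.get? u with
    | none => simp only [fillPhenos, phenoPath, hg]; exact hins
    | some v =>
      simp only [fillPhenos, phenoPath, hg]
      split_ifs <;> simp [fillPhenos, hins]
  | succ fuel ih =>
    intro ph acc u s hs
    have hins : (insFold grp ph acc.reverse).insert u grp = insFold grp ph (u :: acc).reverse := by
      rw [List.reverse_cons, insFold_append]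
    cases hg : g.get? u with
    | none => simp only [fillPhenos, phenoPath, hg]; exact hins
    | some v =>
      simp only [fillPhenos, phenoPath, hg]
      have hmem : ((insFold grp ph acc.reverse).insert u grp).contains v = true
          ↔ (ph.contains v = true ∨ v ∈ (u :: acc)) := by
        rw [hins, mem_insFold]
        simp only [List.mem_reverse]
      by_cases hstop : ph.contains v = true ∨ v ∈ (u :: acc)
      · have h1 : ((insFold grp ph acc.reverse).insert u grp).contains v = true := hmem.mpr hstop
        have h2 : (!(ph.contains v) && !(PySem.Set.contains s v)) = false := by
          rcases hstop with h | h
          · rw [h]; rfl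
          · rw [(PySem.Set.contains_iff s v).mpr ((hs v).mpr h)]
            simp
        rw [h1, h2]
        simp [hins]
      · push_neg at hstop
        have h1 : ((insFold grp ph acc.reverse).insert u grp).contains v = false := by
          rw [Bool.eq_false_iff]; intro hc; exact absurd (hmem.mp hc) (not_or.mpr hstop)
        have h2 : (!(ph.contains v) && !(PySem.Set.contains s v)) = true := by
          have hsv : PySem.Set.contains s v = false := by
            rw [Bool.eq_false_iff]; intro hc
            exact hstop.2 ((hs v).mp ((PySem.Set.contains_iff s v).mp hc))
          rw [Bool.eq_false_iff.mpr hstop.1, hsv]; rfl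
        rw [h1, h2]
        simp only [Bool.false_eq_true, if_false, if_true]
        rw [hins]
        exact ih ph (u :: acc) v (PySem.Set.add s v) (by
          intro x
          rw [PySem.Set.mem_add, hs x]
          simp only [List.mem_cons]
          tauto)

lemma walk_eq0 (g : PySem.Dict Int Int) (grp : Int) (fuel : Nat)
    (ph : PySem.Dict Int Int) (u : Int) :
    fillPhenos g grp (fuel + 1) ph u
      = insFold grp ph (phenoPath g ph fuel [u] (PySem.Set.ofList [u])) := by
  have := walk_eq g grp fuel ph [] u (PySem.Set.ofList [u]) (by
    intro x; rw [PySem.Set.mem_ofList])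
  simpa [insFold] using this

-- frame: updating keys different from the head leaves the head entry in place
lemma final_frame (k : Int) (w : Int) :
    ∀ (l : List (Int × Int)) (t : List (Int × Int)), (∀ p ∈ l, p.1 ≠ k) →
      l.foldl (fun (d : PySem.Dict Int Int) kv => d.insert kv.1 (kv.2 + 1))
          (PySem.Dict.mk ((k, w) :: t))
        = PySem.Dict.mk ((k, w) ::
            (l.foldl (fun (d : PySem.Dict Int Int) kv => d.insert kv.1 (kv.2 + 1))
              (PySem.Dict.mk t)).items) := by
  intro l
  induction l with
  | nil => intro t _; rfl
  | cons kv l ih =>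
    intro t hk
    obtain ⟨k', v'⟩ := kv
    have hk' : k' ≠ k := hk (k', v') (List.mem_cons_self)
    simp only [List.foldl_cons]
    have hstep : (PySem.Dict.mk ((k, w) :: t)).insert k' (v' + 1)
        = PySem.Dict.mk ((k, w) :: ((PySem.Dict.mk t).insert k' (v' + 1)).items) := by
      apply PySem.Dict.ext
      cases hc : (PySem.Dict.mk t).contains k' with
      | true =>
        have hcc : (PySem.Dict.mk ((k, w) :: t)).contains k' = true := by
          rw [PySem.Dict.contains_mk] at hc ⊢
          simp [hc]
        rw [PySem.Dict.items_insert_of_contains _ _ hcc,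
          PySem.Dict.items_insert_of_contains _ _ hc]
        simp [beq_iff_eq, Ne.symm hk']
      | false =>
        have hcc : (PySem.Dict.mk ((k, w) :: t)).contains k' = false := by
          rw [PySem.Dict.contains_mk] at hc ⊢
          simp [hc, beq_iff_eq, Ne.symm hk']
        rw [PySem.Dict.items_insert_of_not_contains _ _ hcc,
          PySem.Dict.items_insert_of_not_contains _ _ hc]
        simp
    rw [hstep, ih _ (fun p hp => hk p (List.mem_cons_of_mem _ hp))]

-- A's final pass `for k, v in d.items(): d[k] = v + 1` bumps every value by one
lemma final_pass :
    ∀ (l : List (Int × Int)), (l.map Prod.fst).Nodup →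
      l.foldl (fun (d : PySem.Dict Int Int) kv => d.insert kv.1 (kv.2 + 1)) (PySem.Dict.mk l)
        = PySem.Dict.mk (l.map (fun kv => (kv.1, kv.2 + 1))) := by
  intro l
  induction l with
  | nil => intro _; rfl
  | cons kv l ih =>
    intro hnd
    obtain ⟨k, v⟩ := kv
    simp only [List.map_cons, List.nodup_cons] at hnd
    obtain ⟨hknot, hnd'⟩ := hnd
    have hk : ∀ p ∈ l, p.1 ≠ k := by
      intro p hp h
      exact hknot (h ▸ List.mem_map_of_mem hp)
    simp only [List.foldl_cons]
    have hhead : (PySem.Dict.mk ((k, v) :: l)).insert k (v + 1)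
        = PySem.Dict.mk ((k, v + 1) :: l) := by
      apply PySem.Dict.ext
      have hc : (PySem.Dict.mk ((k, v) :: l)).contains k = true := by
        simp [PySem.Dict.contains_mk]
      simp only [PySem.Dict.items_insert_of_contains _ _ hc, List.map_cons,
        beq_self_eq_true, if_true]
      congr 1
      conv_rhs => rw [← List.map_id l]
      apply List.map_congr_left
      intro p hp
      simp [beq_iff_eq, hk p hp]
    rw [hhead, final_frame k (v + 1) l l hk, ih hnd']
    rfl

-- outer loop invariant: B's state is A's state with every value bumped and group bumped
lemma outer (g : PySem.Dict Int Int) (n : Nat) :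
    ∀ (L : List Nat) (dp : PySem.Dict Int Int) (grp : Int), dp.keys.Nodup →
      L.foldl (stepB g n) (mv dp, grp + 1)
          = ((mv ((L.foldl (stepA g n) (dp, grp)).1)), (L.foldl (stepA g n) (dp, grp)).2 + 1)
        ∧ ((L.foldl (stepA g n) (dp, grp)).1).keys.Nodup := by
  intro L
  induction L with
  | nil => intro dp grp hnd; exact ⟨rfl, hnd⟩
  | cons i L ih =>
    intro dp grp hnd
    simp only [List.foldl_cons]
    have hB : stepB g n (mv dp, grp + 1) i
        = (mv ((stepA g n (dp, grp) i).1), (stepA g n (dp, grp) i).2 + 1)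
        ∧ ((stepA g n (dp, grp) i).1).keys.Nodup := by
      simp only [stepA, stepB]
      cases hg : g.get? (i : Int) with
      | none => exact ⟨rfl, hnd⟩
      | some v =>
        simp only [mv_contains]
        by_cases hcopy : (dp.contains (i : Int) || dp.contains v) = true
        · have hfill : (!(dp.contains (i : Int)) && !(dp.contains v)) = false := by
            rcases Bool.or_eq_true_iff.mp hcopy with h | h <;> simp [h]
          rw [hcopy, hfill]
          simp only [Bool.false_eq_true, if_false, if_true, mv_get?]
          cases hv : dp.get? v with
          | none => exact ⟨rfl, hnd⟩
          | some w =>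
            simp only [Option.map_some]
            exact ⟨by rw [mv_insert], PySem.Dict.nodup_keys_insert _ _ _ hnd⟩
        · have hfill : (!(dp.contains (i : Int)) && !(dp.contains v)) = true := by
            simp only [Bool.or_eq_true_iff] at hcopy
            push_neg at hcopy
            simp [Bool.eq_false_iff.mpr hcopy.1, Bool.eq_false_iff.mpr hcopy.2]
          have hcopy' : (dp.contains (i : Int) || dp.contains v) = false := by
            simp only [Bool.not_eq_true] at hcopy; exact hcopy
          rw [hcopy', hfill]
          simp only [if_true, Bool.false_eq_true, if_false]
          constructor
          · have h1 : fillPhenos g grp (n + 1) dp (i : Int)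
                = insFold grp dp (phenoPath g dp n [(i : Int)] (PySem.Set.ofList [(i : Int)])) :=
              walk_eq0 g grp n dp (i : Int)
            have h2 : phenoPath g (mv dp) n [(i : Int)] (PySem.Set.ofList [(i : Int)])
                = phenoPath g dp n [(i : Int)] (PySem.Set.ofList [(i : Int)]) :=
              phenoPath_mv g dp n _ _
            rw [h2, h1, mv_insFold]
            exact Prod.ext rfl rfl
          · rw [walk_eq0 g grp n dp (i : Int)]
            exact nodup_insFold _ _ _ hnd
    obtain ⟨hB1, hB2⟩ := hB
    rw [hB1]
    exact ih _ _ hB2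

lemma final_pass' (d : PySem.Dict Int Int) (hnd : d.keys.Nodup) :
    d.items.foldl (fun (d : PySem.Dict Int Int) kv => d.insert kv.1 (kv.2 + 1)) d = mv d := by
  obtain ⟨l⟩ := d
  exact final_pass l (by simpa [PySem.Dict.keys] using hnd)

lemma main_eq (g : PySem.Dict Int Int) (n : Nat) :
    (((List.range n).foldl (stepA g n) (PySem.Dict.empty, 0)).1.items.foldl
        (fun (d : PySem.Dict Int Int) kv => d.insert kv.1 (kv.2 + 1))
        ((List.range n).foldl (stepA g n) (PySem.Dict.empty, 0)).1).items
      = (((List.range n).foldl (stepB g n) (PySem.Dict.empty, 1)).1).items := by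
  obtain ⟨hst, hnd⟩ := outer g n (List.range n) PySem.Dict.empty 0 PySem.Dict.nodup_keys_empty
  have hstart : ((mv (PySem.Dict.empty : PySem.Dict Int Int)), (0 : Int) + 1)
      = ((PySem.Dict.empty : PySem.Dict Int Int), (1 : Int)) := by
    refine Prod.ext rfl ?_
    norm_num
  rw [hstart] at hst
  rw [hst, final_pass' _ hnd]

-- ===== VERDICT (by name: the statement is the Claim_ definition above) =====
theorem phenotyp_spec : Claim_equal_phenotyp := by
  intro TPM genome _ _
  unfold Spec_phenotyp phenotyp phenotyp_alt
  exact main_eq (PySem.Dict.ofList genome) (PySem.Dict.ofList genome).size
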